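-- pv_equiv track=rewrite | github.com/lmiksch/cocopaths | copaths/convert_functions.py | split_ntseq_to_domainfp
-- ===== SOURCE A (Python) =====
-- def d_length(domain):
--     if domain[0] == "b" or domain[0] == "B":
--         return 5
--     elif domain[0] == "l":
--         return 5 # + round(int(domain[1]))
--     return 4
--
-- def split_ntseq_to_domainfp(nt_seq,domain_seq):
--     """Takes a nucleotide sequence and splits it up in subsequences where each sequence i corresponds to the sequence at transcription step i
--
--         Args:
--             nt_seq (string): nucleotide sequence
--             domain_seq (string: domain level sequence
--
--
--         Returns:
--             nt_path (list): list where each sublist corresponds to sequence at transcription step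
--
--     """
--
--     split_seq = domain_seq.split()
--
--     split_nt_sequence = []
--     UL_seq = UL_list(split_seq)
--
--     l_pointer = 0
--     for z in split_seq:
--         r_pointer = l_pointer + d_length(z)
--
--         split_nt_sequence.append(nt_seq[l_pointer:r_pointer])
--         l_pointer = r_pointer
--
--
--
--     nt_path = []
--
--     for  x in range(len(UL_seq)):
--         if UL_seq[x][0] == "l":
--
--             nt_path.append("".join(split_nt_sequence[:x+1]))
--     nt_path.append(nt_seq)
--
--     return nt_path
--
-- def UL_list(list):
--     """ Converts a list of domains into UL list
--     """
--     UL_liste = []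
--     for x in range(len(list)):
--         if list[x][-1] == "*":
--
--             UL_liste.append(list[x][:-1].upper())
--         else:
--             UL_liste.append(list[x])
--
--     return(UL_liste)
-- ===== SOURCE B (Python) =====
-- def split_ntseq_to_domainfp(nt_seq, domain_seq):
--     """Single pass over the domain tokens keeping a running cumulative pointer;
--     the UL normalization is done inline per token; no intermediate per-domain
--     piece list and no join-rebuild."""
--     nt_path = []
--     pointer = 0
--     for z in domain_seq.split():
--         pointer += 5 if z[0] in "bBl" else 4
--         ul = z[:-1].upper() if z[-1] == "*" else z
--         if ul[0] == "l":
--             nt_path.append(nt_seq[:pointer])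
--     nt_path.append(nt_seq)
--     return nt_path
-- ===== Notes on version B (the rewrite author's own statement) =====
-- stated objective: simpler
-- what changed: B replaces A's three passes (build the per-domain piece list, build the UL-normalized list, then re-join piece prefixes per 'l' domain) by one pass over the tokens keeping a running cumulative pointer, normalizing each token inline and slicing nt_seq[:pointer] directly; the piece list, the UL list and the join-rebuild disappear.
import Mathlib
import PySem

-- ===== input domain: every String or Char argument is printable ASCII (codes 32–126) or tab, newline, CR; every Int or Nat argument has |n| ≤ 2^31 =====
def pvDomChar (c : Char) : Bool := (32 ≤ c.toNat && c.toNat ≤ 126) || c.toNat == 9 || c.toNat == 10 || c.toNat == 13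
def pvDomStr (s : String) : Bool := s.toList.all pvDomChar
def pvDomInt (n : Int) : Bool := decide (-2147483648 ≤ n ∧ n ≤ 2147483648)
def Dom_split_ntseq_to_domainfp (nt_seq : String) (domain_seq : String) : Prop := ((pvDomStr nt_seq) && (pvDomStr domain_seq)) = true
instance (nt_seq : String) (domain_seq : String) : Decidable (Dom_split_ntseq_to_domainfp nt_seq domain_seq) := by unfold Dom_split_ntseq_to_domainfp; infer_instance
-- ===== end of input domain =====

-- B replaces A's three passes (piece list, UL list, join of piece prefixes) by one pass with a
-- running cumulative pointer slicing nt_seq directly; objective: simpler. Return values only; no mutation.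

-- ===== PORT A =====
-- d_length: domain[0] via pyGet?; the `none` arm is Python's IndexError, unreachable here
-- since d_length is only applied to tokens of split(), which are nonempty.
def d_length (domain : String) : Nat :=
  match PySem.Str.pyGet? domain 0 with
  | some c => if c = 'b' ∨ c = 'B' then 5 else if c = 'l' then 5 else 4
  | none => 4

-- UL_list: Python iterates `range(len(list))` reading list[x]; ported as the fold over the elements.
def UL_list (list : List String) : List String :=
  list.foldl (fun UL_liste x =>
    if PySem.List.pyGet? x.toList (-1) = some '*' then
      UL_liste ++ [PySem.Str.upper (PySem.Str.slice x none (some (-1)))]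
    else
      UL_liste ++ [x]) []

def split_ntseq_to_domainfp (nt_seq : String) (domain_seq : String) : List String :=
  let split_seq := PySem.Str.split₀ domain_seq
  let UL_seq := UL_list split_seq
  -- first loop: split_nt_sequence with moving l_pointer/r_pointer
  let st := split_seq.foldl (fun (st : Nat × List String) z =>
      let r_pointer := st.1 + d_length z
      (r_pointer, st.2 ++ [PySem.Str.slice nt_seq (some (st.1 : Int)) (some (r_pointer : Int))])) (0, [])
  let split_nt_sequence := st.2
  -- second loop: for x in range(len(UL_seq)); UL_seq[x][0] via pyGetD/pyGet? (an empty UL entry,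
  -- from a bare "*" token, is Python's IndexError, excluded by Pre_)
  let nt_path := (PySem.List.pyRange 0 (PySem.List.len UL_seq) 1).foldl (fun nt_path x =>
      if PySem.Str.pyGet? (PySem.List.pyGetD UL_seq x "") 0 = some 'l' then
        nt_path ++ [PySem.Str.join "" (PySem.List.slice split_nt_sequence none (some (x + 1)))]
      else nt_path) []
  nt_path ++ [nt_seq]

-- ===== PORT B =====
-- one pass: running pointer; z[0]/z[-1] via pyGet? (split() tokens are nonempty);
-- ul[0] via pyGet? (none = Python IndexError on a bare "*" token, excluded by Pre_)
def split_ntseq_to_domainfp_alt (nt_seq : String) (domain_seq : String) : List String :=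
  let st := (PySem.Str.split₀ domain_seq).foldl (fun (st : Nat × List String) z =>
      let first := (PySem.List.pyGet? z.toList 0).getD ' '
      let pointer := st.1 + (if first = 'b' ∨ first = 'B' ∨ first = 'l' then 5 else 4)
      let ul := if PySem.List.pyGet? z.toList (-1) = some '*'
                then PySem.Str.upper (PySem.Str.slice z none (some (-1))) else z
      (pointer,
        if PySem.Str.pyGet? ul 0 = some 'l' then st.2 ++ [PySem.Str.slice nt_seq none (some (pointer : Int))]
        else st.2)) (0, [])
  st.2 ++ [nt_seq]

-- ===== PRECONDITION & SPEC =====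
-- Pre_ excludes exactly the inputs on which the Python A raises IndexError (a whitespace token of
-- domain_seq equal to "*", whose UL-normalized entry is the empty string, which is then indexed);
-- B raises there too.
def Pre_split_ntseq_to_domainfp (nt_seq : String) (domain_seq : String) : Prop :=
  "*" ∉ PySem.Str.split₀ domain_seq
instance (nt_seq : String) (domain_seq : String) : Decidable (Pre_split_ntseq_to_domainfp nt_seq domain_seq) := by
  unfold Pre_split_ntseq_to_domainfp; infer_instance

def pvWitness_split_ntseq_to_domainfp : String × String := ("ACGUACGUACGU", "l b* a l")

def Spec_split_ntseq_to_domainfp (nt_seq : String) (domain_seq : String) (out : List String) : Prop :=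
  out = split_ntseq_to_domainfp_alt nt_seq domain_seq
instance (nt_seq : String) (domain_seq : String) (out : List String) : Decidable (Spec_split_ntseq_to_domainfp nt_seq domain_seq out) := by
  unfold Spec_split_ntseq_to_domainfp; infer_instance

-- ===== CLAIM (what is proved, stated in full; the proofs are below) =====
def Claim_equal_split_ntseq_to_domainfp : Prop := ∀ (nt_seq : String) (domain_seq : String), Dom_split_ntseq_to_domainfp nt_seq domain_seq → Pre_split_ntseq_to_domainfp nt_seq domain_seq → Spec_split_ntseq_to_domainfp nt_seq domain_seq (split_ntseq_to_domainfp nt_seq domain_seq)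

-- ===== LEMMAS AND PROOFS =====

-- the pointer increment of B, as a function of the token
def pvInc (t : String) : Nat :=
  if (PySem.List.pyGet? t.toList 0).getD ' ' = 'b' ∨ (PySem.List.pyGet? t.toList 0).getD ' ' = 'B' ∨
     (PySem.List.pyGet? t.toList 0).getD ' ' = 'l' then 5 else 4

-- the UL normalization of a single token
def pvUl (t : String) : String :=
  if PySem.List.pyGet? t.toList (-1) = some '*' then PySem.Str.upper (PySem.Str.slice t none (some (-1)))
  else t

-- the common shape of both results (everything before the final nt_seq), one token at a time
def pvSpec (nt : String) : List String → Nat → List String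
  | [], _ => []
  | t :: r, c =>
    (if PySem.Str.pyGet? (pvUl t) 0 = some 'l'
     then [PySem.Str.slice nt none (some ((c + pvInc t : Nat) : Int))] else []) ++ pvSpec nt r (c + pvInc t)

-- A's split_nt_sequence, one token at a time
def pvPieces (nt : String) : List String → Nat → List String
  | [], _ => []
  | t :: r, p => PySem.Str.slice nt (some (p : Int)) (some ((p + d_length t : Nat) : Int)) :: pvPieces nt r (p + d_length t)

lemma pvSpec_cons (nt t : String) (r : List String) (c : Nat) :
    pvSpec nt (t :: r) c
      = (if PySem.Str.pyGet? (pvUl t) 0 = some 'l'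
         then [PySem.Str.slice nt none (some ((c + pvInc t : Nat) : Int))] else []) ++ pvSpec nt r (c + pvInc t) := rfl
lemma pvPieces_cons (nt t : String) (r : List String) (p : Nat) :
    pvPieces nt (t :: r) p
      = PySem.Str.slice nt (some (p : Int)) (some ((p + d_length t : Nat) : Int)) :: pvPieces nt r (p + d_length t) := rfl

lemma pvSplit₀_go_ne (s : List Char) : ∀ (cur : List Char) (acc : List (List Char)),
    (∀ u ∈ acc, u ≠ []) → ∀ u ∈ PySem.Chars.split₀.go s cur acc, u ≠ [] := by
  induction s with
  | nil =>
    intro cur acc hacc u hu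
    rw [PySem.Chars.split₀.go.eq_def] at hu
    by_cases hc : cur.isEmpty
    · simp only [hc, if_true] at hu
      exact hacc u (List.mem_reverse.mp hu)
    · simp only [hc, if_false] at hu
      rcases List.mem_cons.mp (List.mem_reverse.mp hu) with h | h
      · subst h; simpa using fun h' => hc (by simp [List.isEmpty_iff, ← List.reverse_eq_nil_iff, h'])
      · exact hacc u h
  | cons c rest ih =>
    intro cur acc hacc u hu
    rw [PySem.Chars.split₀.go.eq_def] at hu
    by_cases hs : PySem.Chars.isspace c
    · by_cases hc : cur.isEmpty
      · simp only [hs, hc, if_true] at hu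
        exact ih [] acc hacc u hu
      · simp only [hs, hc, if_true, if_false] at hu
        refine ih [] _ ?_ u hu
        intro v hv
        rcases List.mem_cons.mp hv with h | h
        · subst h; simpa using fun h' => hc (by simp [List.isEmpty_iff, ← List.reverse_eq_nil_iff, h'])
        · exact hacc v h
    · simp only [hs, if_false] at hu
      exact ih (c :: cur) acc hacc u hu

lemma pvTok_ne (s : String) (t : String) (ht : t ∈ PySem.Str.split₀ s) : t.toList ≠ [] := by
  have h1 : t.toList ∈ PySem.Chars.split₀ s.toList := by
    rw [← PySem.Str.split₀_map_toList]
    exact List.mem_map_of_mem ht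
  exact pvSplit₀_go_ne s.toList [] [] (by simp) t.toList h1

lemma pvInc_eq_dlen (t : String) (h : t.toList ≠ []) : d_length t = pvInc t := by
  unfold d_length pvInc
  cases htl : t.toList with
  | nil => exact absurd htl h
  | cons c rest =>
    have h0 : PySem.Str.pyGet? t 0 = some c := by
      simp [htl, PySem.List.pyGet?_zero_cons]
    rw [h0]
    simp only [htl, PySem.List.pyGet?_zero_cons, Option.getD_some]
    split_ifs <;> tauto

lemma pvB_fold (nt : String) : ∀ (r : List String) (c : Nat) (acc : List String),
    r.foldl (fun (st : Nat × List String) z =>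
      let first := (PySem.List.pyGet? z.toList 0).getD ' '
      let pointer := st.1 + (if first = 'b' ∨ first = 'B' ∨ first = 'l' then 5 else 4)
      let ul := if PySem.List.pyGet? z.toList (-1) = some '*'
                then PySem.Str.upper (PySem.Str.slice z none (some (-1))) else z
      (pointer,
        if PySem.Str.pyGet? ul 0 = some 'l' then st.2 ++ [PySem.Str.slice nt none (some (pointer : Int))]
        else st.2)) (c, acc)
    = (c + (r.map pvInc).sum, acc ++ pvSpec nt r c) := by
  intro r
  induction r with
  | nil => intro c acc; simp [pvSpec]
  | cons t r ih =>
    intro c acc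
    rw [List.foldl_cons, ih, pvSpec_cons]
    have hinc : (if (PySem.List.pyGet? t.toList 0).getD ' ' = 'b' ∨ (PySem.List.pyGet? t.toList 0).getD ' ' = 'B' ∨
        (PySem.List.pyGet? t.toList 0).getD ' ' = 'l' then 5 else 4) = pvInc t := rfl
    have hul : (if PySem.List.pyGet? t.toList (-1) = some '*'
        then PySem.Str.upper (PySem.Str.slice t none (some (-1))) else t) = pvUl t := rfl
    simp only [hinc, hul, Prod.mk.injEq]
    refine ⟨by simp [List.map_cons, List.sum_cons]; omega, ?_⟩
    split <;> simp

lemma pvA_fold (nt : String) : ∀ (r : List String) (p : Nat) (acc : List String),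
    r.foldl (fun (st : Nat × List String) z =>
      let r_pointer := st.1 + d_length z
      (r_pointer, st.2 ++ [PySem.Str.slice nt (some (st.1 : Int)) (some (r_pointer : Int))])) (p, acc)
    = (p + (r.map d_length).sum, acc ++ pvPieces nt r p) := by
  intro r
  induction r with
  | nil => intro p acc; simp [pvPieces]
  | cons t r ih =>
    intro p acc
    rw [List.foldl_cons, ih, pvPieces_cons]
    simp only [List.map_cons, List.sum_cons, Prod.mk.injEq]
    refine ⟨by omega, ?_⟩
    simp

lemma pvJoinNil (ll : List (List Char)) : PySem.Chars.join [] ll = ll.flatten := by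
  induction ll with
  | nil => simp [PySem.Chars.join_nil]
  | cons a l ih =>
    cases l with
    | nil => simp [PySem.Chars.join_singleton]
    | cons b m => rw [PySem.Chars.join_cons_cons]; simp_all

lemma pvJoinTake (nt : String) : ∀ (r : List String) (k p : Nat),
    (PySem.Str.join "" ((pvPieces nt r p).take k)).toList
      = (nt.toList.drop p).take (((r.take k).map d_length).sum) := by
  intro r
  induction r with
  | nil => intro k p; simp [pvPieces, PySem.Str.toList_join]
  | cons t r ih =>
    intro k p
    cases k with
    | zero => simp [PySem.Str.toList_join]
    | succ k =>
      rw [pvPieces_cons, List.take_succ_cons]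
      have hnil : ("".toList : List Char) = [] := rfl
      have ihX := ih k (p + d_length t)
      rw [PySem.Str.toList_join, hnil, pvJoinNil] at ihX
      rw [PySem.Str.toList_join, hnil, List.map_cons, pvJoinNil, List.flatten_cons, ihX]
      have hslice : (PySem.Str.slice nt (some (p : Int)) (some ((p + d_length t : Nat) : Int))).toList
          = (nt.toList.drop p).take (d_length t) := by
        rw [PySem.Str.toList_slice]
        simp [PySem.Chars.slice_eq_listSlice, PySem.List.slice_natCast_add]
      rw [hslice, List.take_succ_cons, List.map_cons, List.sum_cons, List.take_add]
      simp [List.drop_drop]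

lemma pvA_loop (nt : String) (ts : List String) (hne : ∀ t ∈ ts, t.toList ≠ []) :
    ∀ (m a : Nat) (acc : List String), a + m = ts.length →
    (PySem.List.pyRange (a : Int) (ts.length : Int) 1).foldl
      (fun nt_path x =>
        if PySem.Str.pyGet? (PySem.List.pyGetD (ts.map pvUl) x "") 0 = some 'l' then
          nt_path ++ [PySem.Str.join "" (PySem.List.slice (pvPieces nt ts 0) none (some (x + 1)))]
        else nt_path) acc
    = acc ++ pvSpec nt (ts.drop a) (((ts.take a).map d_length).sum) := by
  intro m
  induction m with
  | zero =>
    intro a acc ha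
    have : a = ts.length := by omega
    subst this
    simp [PySem.List.pyRange, pvSpec]
  | succ m ih =>
    intro a acc ha
    have hlt : a < ts.length := by omega
    rw [PySem.List.pyRange_one_cons (by exact_mod_cast hlt), List.foldl_cons]
    have hmem : ts[a] ∈ ts := List.getElem_mem hlt
    have hgetD : PySem.List.pyGetD (ts.map pvUl) (a : Int) "" = pvUl ts[a] := by
      rw [PySem.List.pyGetD_natCast]
      rw [List.getD_eq_getElem _ _ (by simpa using hlt)]
      simp
    have hsum : (List.map d_length (List.take (a+1) ts)).sum
        = (List.map d_length (List.take a ts)).sum + pvInc ts[a] := by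
      rw [← List.take_concat_get hlt, List.concat_eq_append, List.map_append, List.sum_append]
      simp [pvInc_eq_dlen ts[a] (hne _ hmem)]
    have helem : PySem.Str.join "" (PySem.List.slice (pvPieces nt ts 0) none (some ((a + 1 : Nat) : Int)))
        = PySem.Str.slice nt none (some ((((ts.take a).map d_length).sum + pvInc ts[a] : Nat) : Int)) := by
      apply String.toList_injective
      rw [PySem.List.slice_to_natCast, pvJoinTake]
      rw [PySem.Str.toList_slice]
      simp only [PySem.Chars.slice_eq_listSlice, PySem.List.slice_to_natCast, List.drop_zero]
      rw [hsum]
    have hdrop : ts.drop a = ts[a] :: ts.drop (a + 1) := List.drop_eq_getElem_cons hlt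
    rw [hgetD, hdrop, pvSpec_cons]
    rw [show ((a : Int) + 1) = ((a + 1 : Nat) : Int) by push_cast; ring]
    by_cases hc : PySem.Str.pyGet? (pvUl ts[a]) 0 = some 'l'
    · rw [if_pos hc, if_pos hc, helem]
      rw [ih (a+1) (acc ++ [PySem.Str.slice nt none (some ((((ts.take a).map d_length).sum + pvInc ts[a] : Nat) : Int))]) (by omega)]
      rw [hsum]
      simp
    · rw [if_neg hc, if_neg hc]
      rw [ih (a+1) acc (by omega), hsum]
      simp

-- ===== VERDICT (by name: the statement is the Claim_ definition above) =====
theorem split_ntseq_to_domainfp_spec : Claim_equal_split_ntseq_to_domainfp := by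
  intro nt ds _ _
  unfold Spec_split_ntseq_to_domainfp
  have hne : ∀ t ∈ PySem.Str.split₀ ds, t.toList ≠ [] := fun t ht => pvTok_ne ds t ht
  have hB : split_ntseq_to_domainfp_alt nt ds = pvSpec nt (PySem.Str.split₀ ds) 0 ++ [nt] := by
    show ((PySem.Str.split₀ ds).foldl (fun (st : Nat × List String) z =>
        let first := (PySem.List.pyGet? z.toList 0).getD ' '
        let pointer := st.1 + (if first = 'b' ∨ first = 'B' ∨ first = 'l' then 5 else 4)
        let ul := if PySem.List.pyGet? z.toList (-1) = some '*'
                  then PySem.Str.upper (PySem.Str.slice z none (some (-1))) else z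
        (pointer,
          if PySem.Str.pyGet? ul 0 = some 'l' then st.2 ++ [PySem.Str.slice nt none (some (pointer : Int))]
          else st.2)) (0, [])).2 ++ [nt] = _
    rw [pvB_fold]
    simp
  have hA : split_ntseq_to_domainfp nt ds = pvSpec nt (PySem.Str.split₀ ds) 0 ++ [nt] := by
    show (PySem.List.pyRange 0 (PySem.List.len (UL_list (PySem.Str.split₀ ds))) 1).foldl
        (fun nt_path x =>
          if PySem.Str.pyGet? (PySem.List.pyGetD (UL_list (PySem.Str.split₀ ds)) x "") 0 = some 'l' then
            nt_path ++ [PySem.Str.join "" (PySem.List.slice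
              (((PySem.Str.split₀ ds).foldl (fun (st : Nat × List String) z =>
                let r_pointer := st.1 + d_length z
                (r_pointer, st.2 ++ [PySem.Str.slice nt (some (st.1 : Int)) (some (r_pointer : Int))])) (0, [])).2)
              none (some (x + 1)))]
          else nt_path) [] ++ [nt] = _
    rw [pvA_fold]
    have hUL : UL_list (PySem.Str.split₀ ds) = (PySem.Str.split₀ ds).map pvUl := by
      unfold UL_list
      have hb : (fun (UL_liste : List String) x =>
          if PySem.List.pyGet? x.toList (-1) = some '*' then
            UL_liste ++ [PySem.Str.upper (PySem.Str.slice x none (some (-1)))]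
          else UL_liste ++ [x]) = fun acc x => acc ++ [pvUl x] := by
        funext acc x; unfold pvUl; split <;> rfl
      rw [hb, PySem.List.foldl_append_singleton_eq_map, List.nil_append]
    rw [hUL]
    simp only [PySem.List.len_eq, List.length_map, List.nil_append]
    have haloop := pvA_loop nt (PySem.Str.split₀ ds) hne (PySem.Str.split₀ ds).length 0 [] (by omega)
    simp only [Nat.cast_zero, List.take_zero, List.drop_zero, List.map_nil, List.sum_nil,
      List.nil_append] at haloop
    rw [haloop]
  rw [hA, hB]
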